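-- pv_equiv track=rewrite | github.com/aiden-boyce/Advent-of-Code-2023 | day_three.py | sum_adj_nums
-- ===== SOURCE A (Python) =====
-- def sum_adj_nums(lines, sp_i, adj_nums):
--     sum = 0
--     # Only go through rows directly above, equal to, or directly below it
--     for i in range(sp_i-1, sp_i+2):
--         j = 0
--         # Iterate through each column
--         while j < len(lines[i]):
--             symbol = lines[i][j]
--             # Reached a number
--             if symbol.isdigit():
--                 is_adj = False
--                 num = ""
--                 num_j = j
--                 # Add the whole number to a string
--                 while symbol.isdigit():
--                     num += symbol
--                     # Check if the number is adjacent to a special character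
--                     if [i, num_j] in adj_nums:
--                         is_adj = True
--                     num_j += 1
--                     try:
--                         symbol = lines[i][num_j]
--                     except IndexError:
--                         break
--                 j = num_j
--                 # Add num to sum if it was adjacent
--                 if is_adj:
--                     sum += int(num)
--             j += 1
--
--     return sum
-- ===== SOURCE B (Python) =====
-- import re
--
--
-- def sum_adj_nums(lines, sp_i, adj_nums):
--     total = 0
--     # Same three rows as A (negative index wraps like Python's lines[i])
--     for i in range(sp_i - 1, sp_i + 2):
--         for m in re.finditer(r'[0-9]+', lines[i]):
--             if any([i, j] in adj_nums for j in range(m.start(), m.end())):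
--                 total += int(m.group())
--     return total
-- ===== Notes on version B (the rewrite author's own statement) =====
-- stated objective: idiomatic
-- what changed: replaces A's hand-written nested while-loop character scanner (manual digit accumulation into a string with index juggling) by regex token extraction: re.finditer yields each number with its span, and an any() over the span decides adjacency
import Mathlib
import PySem

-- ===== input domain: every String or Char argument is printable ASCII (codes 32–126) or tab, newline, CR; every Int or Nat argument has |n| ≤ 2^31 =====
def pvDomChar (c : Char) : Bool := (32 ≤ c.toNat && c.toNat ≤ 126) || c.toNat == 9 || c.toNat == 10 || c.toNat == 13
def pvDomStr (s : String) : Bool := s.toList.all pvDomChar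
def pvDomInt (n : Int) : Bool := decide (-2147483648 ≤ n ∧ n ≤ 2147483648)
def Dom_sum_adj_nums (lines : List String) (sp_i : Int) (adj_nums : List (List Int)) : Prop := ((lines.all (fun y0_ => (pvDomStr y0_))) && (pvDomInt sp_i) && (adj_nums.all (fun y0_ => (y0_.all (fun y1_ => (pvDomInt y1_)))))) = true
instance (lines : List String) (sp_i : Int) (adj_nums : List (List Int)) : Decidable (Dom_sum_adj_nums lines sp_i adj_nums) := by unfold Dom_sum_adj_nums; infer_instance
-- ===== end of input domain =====

-- B replaces A's hand-written nested while-loop digit scanner by token extraction: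
-- digit runs with their spans are listed first (re.finditer in Python), then each
-- run is summed once if any of its columns is adjacent. Same cost, more idiomatic.


-- ===== PORT A =====
-- inner `while symbol.isdigit(): …` loop of A: accumulates the digit string `num`,
-- checks [i, num_j] ∈ adj_nums along the way, stops at the first non-digit or
-- at the end of the row (the caught IndexError = the `none` branch).
-- (fuel = remaining row length + 1, only to make the recursion structural;
--  the 0 branch is never reached for the fuel pvInnerA supplies)
def pvInnerAGo (s : List Char) (i : Int) (adj : List (List Int)) :
    Nat → Char → List Char → Nat → Bool → List Char × Nat × Bool
  | 0, _, num, num_j, is_adj => (num, num_j, is_adj)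
  | fuel + 1, symbol, num, num_j, is_adj =>
    if PySem.Chars.isdigit symbol then
      let num' := num ++ [symbol]
      let is_adj' := if [i, (num_j : Int)] ∈ adj then true else is_adj
      match s[num_j + 1]? with
      | none => (num', num_j + 1, is_adj')
      | some c => pvInnerAGo s i adj fuel c num' (num_j + 1) is_adj'
    else (num, num_j, is_adj)

def pvInnerA (s : List Char) (i : Int) (adj : List (List Int)) (symbol : Char)
    (num : List Char) (num_j : Nat) (is_adj : Bool) : List Char × Nat × Bool :=
  pvInnerAGo s i adj (s.length + 1) symbol num num_j is_adj

-- outer `while j < len(lines[i]):` loop of A over one row (fuel likewise)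
def pvRowAGo (s : List Char) (i : Int) (adj : List (List Int)) :
    Nat → Nat → Int → Int
  | 0, _, sum => sum
  | fuel + 1, j, sum =>
    if h : j < s.length then
      if PySem.Chars.isdigit s[j] then
        let r := pvInnerA s i adj s[j] [] j false
        -- int(num): num is a nonempty digit string here, so int() always returns
        let sum' := if r.2.2 then sum + (PySem.Int.ofChars? r.1).getD 0 else sum
        pvRowAGo s i adj fuel (r.2.1 + 1) sum'
      else
        pvRowAGo s i adj fuel (j + 1) sum
    else sum

def pvRowA (s : List Char) (i : Int) (adj : List (List Int)) (j : Nat) (sum : Int) : Int :=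
  pvRowAGo s i adj (s.length + 1 - j) j sum

def sum_adj_nums (lines : List String) (sp_i : Int) (adj_nums : List (List Int)) : Int :=
  (PySem.List.pyRange (sp_i - 1) (sp_i + 2) 1).foldl
    (fun sum i =>
      match PySem.List.pyGet? lines i with
      | none => sum   -- Python A raises IndexError here; such inputs are outside Pre_
      | some line => pvRowA line.toList i adj_nums 0 sum) 0

-- ===== PORT B =====
-- re.finditer(r'[0-9]+', row): every maximal digit run with its start position
-- (fuel = list length + 1 makes the recursion structural; 0 is never reached)
def pvRunsGo : Nat → List Char → Nat → List (Nat × List Char)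
  | 0, _, _ => []
  | _ + 1, [], _ => []
  | fuel + 1, c :: rest, pos =>
    if PySem.Chars.isdigit c then
      (pos, c :: rest.takeWhile PySem.Chars.isdigit) ::
        pvRunsGo fuel (rest.dropWhile PySem.Chars.isdigit)
          (pos + (c :: rest.takeWhile PySem.Chars.isdigit).length)
    else pvRunsGo fuel rest (pos + 1)

def pvRuns (cs : List Char) (pos : Nat) : List (Nat × List Char) :=
  pvRunsGo (cs.length + 1) cs pos

-- one row of B: sum int(m.group()) over matches whose span meets adj_nums
def pvRowB (i : Int) (adj : List (List Int)) (s : List Char) : Int :=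
  ((pvRuns s 0).map (fun r =>
      if (List.range' r.1 r.2.length).any (fun j => decide ([i, (j : Int)] ∈ adj)) then
        (PySem.Int.ofChars? r.2).getD 0
      else 0)).sum

def sum_adj_nums_alt (lines : List String) (sp_i : Int) (adj_nums : List (List Int)) : Int :=
  ((PySem.List.pyRange (sp_i - 1) (sp_i + 2) 1).map
    (fun i =>
      match PySem.List.pyGet? lines i with
      | none => 0   -- Python B raises IndexError here; such inputs are outside Pre_
      | some line => pvRowB i adj_nums line.toList)).sum

-- ===== PRECONDITION & SPEC =====
-- Pre_: all three rows sp_i-1, sp_i, sp_i+1 are valid Python indices into lines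
-- (A evaluates len(lines[i]) for each and raises IndexError otherwise).
def Pre_sum_adj_nums (lines : List String) (sp_i : Int) (adj_nums : List (List Int)) : Prop :=
  -(lines.length : Int) ≤ sp_i - 1 ∧ sp_i + 1 < (lines.length : Int)
instance (lines : List String) (sp_i : Int) (adj_nums : List (List Int)) : Decidable (Pre_sum_adj_nums lines sp_i adj_nums) := by unfold Pre_sum_adj_nums; infer_instance

def pvWitness_sum_adj_nums : List String × Int × List (List Int) :=
  (["12*", "3.4", "..5"], 1, [[0, 1], [2, 2]])

def Spec_sum_adj_nums (lines : List String) (sp_i : Int) (adj_nums : List (List Int)) (out : Int) : Prop := out = sum_adj_nums_alt lines sp_i adj_nums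
instance (lines : List String) (sp_i : Int) (adj_nums : List (List Int)) (out : Int) : Decidable (Spec_sum_adj_nums lines sp_i adj_nums out) := by unfold Spec_sum_adj_nums; infer_instance

-- ===== CLAIM (what is proved, stated in full; the proofs are below) =====
def Claim_equal_sum_adj_nums : Prop := ∀ (lines : List String) (sp_i : Int) (adj_nums : List (List Int)), Dom_sum_adj_nums lines sp_i adj_nums → Pre_sum_adj_nums lines sp_i adj_nums → Spec_sum_adj_nums lines sp_i adj_nums (sum_adj_nums lines sp_i adj_nums)

-- ===== LEMMAS AND PROOFS =====

-- value of one row of B, abstracted over the run list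
def pvBVal (i : Int) (adj : List (List Int)) (rs : List (Nat × List Char)) : Int :=
  (rs.map (fun r =>
      if (List.range' r.1 r.2.length).any (fun j => decide ([i, (j : Int)] ∈ adj)) then
        (PySem.Int.ofChars? r.2).getD 0
      else 0)).sum

theorem pvRowB_eq_bval (i : Int) (adj : List (List Int)) (s : List Char) :
    pvRowB i adj s = pvBVal i adj (pvRuns s 0) := rfl

theorem pvBVal_cons (i : Int) (adj : List (List Int)) (r : Nat × List Char)
    (rs : List (Nat × List Char)) :
    pvBVal i adj (r :: rs) =
      (if (List.range' r.1 r.2.length).any (fun j => decide ([i, (j : Int)] ∈ adj)) then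
        (PySem.Int.ofChars? r.2).getD 0 else 0) + pvBVal i adj rs := by
  simp [pvBVal]

theorem pvRunsGo_adequate :
    ∀ (fuel : Nat) (cs : List Char) (pos : Nat), cs.length < fuel →
      pvRunsGo fuel cs pos = pvRuns cs pos := by
  intro fuel
  induction fuel using Nat.strong_induction_on with
  | _ fuel ih =>
    intro cs pos hlt
    match fuel, cs with
    | 0, _ => omega
    | f + 1, [] => simp [pvRuns, pvRunsGo]
    | f + 1, c :: rest =>
      have h1 := List.length_dropWhile_le (p := PySem.Chars.isdigit) (l := rest)
      simp only [List.length_cons] at hlt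
      show pvRunsGo (f + 1) (c :: rest) pos = pvRunsGo (rest.length + 1 + 1) (c :: rest) pos
      by_cases hc : PySem.Chars.isdigit c
      · have e1 := ih f (by omega) (rest.dropWhile PySem.Chars.isdigit)
            (pos + (c :: rest.takeWhile PySem.Chars.isdigit).length) (by omega)
        have e2 := ih (rest.length + 1) (by omega) (rest.dropWhile PySem.Chars.isdigit)
            (pos + (c :: rest.takeWhile PySem.Chars.isdigit).length) (by omega)
        simp only [pvRunsGo]
        rw [if_pos hc, if_pos hc, e1, e2]
      · have e3 := ih f (by omega) rest (pos + 1) (by omega)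
        have e4 := ih (rest.length + 1) (by omega) rest (pos + 1) (by omega)
        simp only [pvRunsGo]
        rw [if_neg (by simp [hc]), if_neg (by simp [hc]), e3, e4]

theorem pvRuns_nil (pos : Nat) : pvRuns [] pos = [] := by
  simp [pvRuns, pvRunsGo]

theorem pvRuns_cons_digit (c : Char) (rest : List Char) (pos : Nat)
    (h : PySem.Chars.isdigit c = true) :
    pvRuns (c :: rest) pos =
      (pos, c :: rest.takeWhile PySem.Chars.isdigit) ::
        pvRuns (rest.dropWhile PySem.Chars.isdigit)
          (pos + (c :: rest.takeWhile PySem.Chars.isdigit).length) := by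
  have h1 := List.length_dropWhile_le (p := PySem.Chars.isdigit) (l := rest)
  have e2 := pvRunsGo_adequate (rest.length + 1) (rest.dropWhile PySem.Chars.isdigit)
      (pos + (c :: rest.takeWhile PySem.Chars.isdigit).length) (by omega)
  show pvRunsGo ((c :: rest).length + 1) (c :: rest) pos = _
  rw [show (c :: rest).length + 1 = rest.length + 1 + 1 from by simp]
  simp only [pvRunsGo]
  rw [if_pos h, e2]

theorem pvRuns_cons_not (c : Char) (rest : List Char) (pos : Nat)
    (h : PySem.Chars.isdigit c = false) :
    pvRuns (c :: rest) pos = pvRuns rest (pos + 1) := by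
  have e4 := pvRunsGo_adequate (rest.length + 1) rest (pos + 1) (by omega)
  show pvRunsGo ((c :: rest).length + 1) (c :: rest) pos = _
  rw [show (c :: rest).length + 1 = rest.length + 1 + 1 from by simp]
  simp only [pvRunsGo]
  rw [if_neg (by simp [h]), e4]

theorem pvDropWhile_eq_drop {α : Type} (p : α → Bool) :
    ∀ (l : List α), l.dropWhile p = l.drop (l.takeWhile p).length := by
  intro l
  induction l with
  | nil => simp
  | cons a l ih =>
    by_cases ha : p a
    · simp [List.dropWhile_cons, List.takeWhile_cons, ha, ih]
    · simp [List.dropWhile_cons, List.takeWhile_cons, ha]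

theorem pvHead_dropWhile_false {α : Type} (p : α → Bool) :
    ∀ (l : List α) (c : α) (t : List α), l.dropWhile p = c :: t → p c = false := by
  intro l
  induction l with
  | nil => intro c t h; simp at h
  | cons a l ih =>
    intro c t h
    by_cases ha : p a
    · exact ih c t (by simpa [List.dropWhile_cons, ha] using h)
    · simp [List.dropWhile_cons, ha] at h
      simpa [h.1] using ha

-- characterization of A's inner loop started at a position k inside the row
theorem pvInnerAGo_spec (s : List Char) (i : Int) (adj : List (List Int)) :
    ∀ (fuel k : Nat) (hf : s.length ≤ fuel + k) (hk : k < s.length)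
      (num : List Char) (is_adj : Bool),
      pvInnerAGo s i adj fuel s[k] num k is_adj =
        (num ++ (s.drop k).takeWhile PySem.Chars.isdigit,
         k + ((s.drop k).takeWhile PySem.Chars.isdigit).length,
         is_adj || (List.range' k ((s.drop k).takeWhile PySem.Chars.isdigit).length).any
           (fun j => decide ([i, (j : Int)] ∈ adj))) := by
  intro fuel
  induction fuel with
  | zero => intro k hf hk; omega
  | succ fuel ih =>
    intro k hf hk num is_adj
    have hdrop : s.drop k = s[k] :: s.drop (k + 1) := (List.getElem_cons_drop hk).symm
    simp only [pvInnerAGo]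
    by_cases hdig : PySem.Chars.isdigit s[k]
    · rw [if_pos hdig]
      have htw : (s.drop k).takeWhile PySem.Chars.isdigit
          = s[k] :: (s.drop (k + 1)).takeWhile PySem.Chars.isdigit := by
        rw [hdrop, List.takeWhile_cons, if_pos hdig]
      by_cases hm : [i, (k : Int)] ∈ adj
      all_goals
        first
          | rw [if_pos hm]
          | rw [if_neg hm]
      all_goals
        split
        · -- s[k+1]? = none: the run is the single digit ending the row
          rename_i heq
          have hlen : s.length ≤ k + 1 := by
            by_contra hlt
            simp [List.getElem?_eq_getElem (Nat.lt_of_not_le hlt)] at heq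
          have hnil : s.drop (k + 1) = ([] : List Char) := List.drop_eq_nil_of_le hlen
          simp only [htw, hnil, List.takeWhile_nil, Prod.mk.injEq]
          refine ⟨by simp, by simp, ?_⟩
          simp only [List.length_cons, List.length_nil, Nat.zero_add, List.range'_one,
            List.any_cons, List.any_nil, Bool.or_false]
          cases is_adj <;> simp [hm]
        · rename_i c heq
          have hk1 : k + 1 < s.length := (List.getElem?_eq_some_iff.mp heq).1
          have hc : c = s[k + 1] := ((List.getElem?_eq_some_iff.mp heq).2).symm
          rw [hc, ih (k + 1) (by omega) hk1]
          simp only [htw, Prod.mk.injEq]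
          refine ⟨by simp, ?_, ?_⟩
          · simp only [List.length_cons]
            omega
          · simp only [List.length_cons, List.range'_succ, List.any_cons]
            cases is_adj <;> simp [hm]
    · rw [if_neg hdig]
      have htw : (s.drop k).takeWhile PySem.Chars.isdigit = ([] : List Char) := by
        rw [hdrop, List.takeWhile_cons, if_neg hdig]
      simp [htw]

theorem pvInnerA_spec (s : List Char) (i : Int) (adj : List (List Int))
    (k : Nat) (hk : k < s.length) (num : List Char) (is_adj : Bool) :
    pvInnerA s i adj s[k] num k is_adj =
      (num ++ (s.drop k).takeWhile PySem.Chars.isdigit,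
       k + ((s.drop k).takeWhile PySem.Chars.isdigit).length,
       is_adj || (List.range' k ((s.drop k).takeWhile PySem.Chars.isdigit).length).any
         (fun j => decide ([i, (j : Int)] ∈ adj))) :=
  pvInnerAGo_spec s i adj (s.length + 1) k (by omega) hk num is_adj

-- A's row loop from position j equals B's value of the runs of the remaining suffix
theorem pvRowAGo_eq (s : List Char) (i : Int) (adj : List (List Int)) :
    ∀ (fuel j : Nat), s.length ≤ fuel + j → ∀ (sum : Int),
      pvRowAGo s i adj fuel j sum = sum + pvBVal i adj (pvRuns (s.drop j) j) := by
  intro fuel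
  induction fuel with
  | zero =>
    intro j hd sum
    have hnil : s.drop j = ([] : List Char) := List.drop_eq_nil_of_le (by omega)
    simp only [pvRowAGo]
    rw [hnil, pvRuns_nil]
    simp [pvBVal]
  | succ fuel ih =>
    intro j hd sum
    simp only [pvRowAGo]
    by_cases hj : j < s.length
    · have hdrop : s.drop j = s[j] :: s.drop (j + 1) := (List.getElem_cons_drop hj).symm
      rw [dif_pos hj]
      by_cases hdig : PySem.Chars.isdigit s[j]
      · rw [if_pos hdig]
        rw [pvInnerA_spec s i adj j hj [] false]
        have hrun' : (s.drop j).takeWhile PySem.Chars.isdigit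
            = s[j] :: (s.drop (j + 1)).takeWhile PySem.Chars.isdigit := by
          rw [hdrop, List.takeWhile_cons, if_pos hdig]
        have hdw : (s.drop (j + 1)).dropWhile PySem.Chars.isdigit
            = s.drop (j + ((s.drop j).takeWhile PySem.Chars.isdigit).length) := by
          rw [pvDropWhile_eq_drop, List.drop_drop]
          congr 1
          rw [hrun']
          simp only [List.length_cons]
          omega
        have hruns : pvRuns (s.drop j) j
            = (j, (s.drop j).takeWhile PySem.Chars.isdigit) ::
                pvRuns (s.drop (j + ((s.drop j).takeWhile PySem.Chars.isdigit).length))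
                  (j + ((s.drop j).takeWhile PySem.Chars.isdigit).length) := by
          conv_lhs => rw [hdrop, pvRuns_cons_digit s[j] (s.drop (j + 1)) j hdig]
          rw [← hrun', hdw]
        set n := ((s.drop j).takeWhile PySem.Chars.isdigit).length with hn
        have hn1 : 1 ≤ n := by rw [hn, hrun']; simp
        have hskip : pvRuns (s.drop (j + n)) (j + n)
            = pvRuns (s.drop (j + n + 1)) (j + n + 1) := by
          rcases h2 : s.drop (j + n) with _ | ⟨c, t⟩
          · have hlen2 : s.length ≤ j + n := by
              have h3 := List.length_drop (l := s) (i := j + n)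
              rw [h2] at h3
              simp at h3
              omega
            have h4 : s.drop (j + n + 1) = ([] : List Char) :=
              List.drop_eq_nil_of_le (by omega)
            rw [h4, pvRuns_nil, pvRuns_nil]
          · have hcnd : PySem.Chars.isdigit c = false := by
              apply pvHead_dropWhile_false PySem.Chars.isdigit (s.drop (j + 1)) c t
              rw [hdw]
              exact h2
            have ht : t = s.drop (j + n + 1) := by
              have h5 : s.drop (j + n + 1) = (s.drop (j + n)).drop 1 := by
                rw [List.drop_drop]
              rw [h5, h2]
              simp
            rw [pvRuns_cons_not c t (j + n) hcnd, ht]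
        rw [ih (j + n + 1) (by omega), hruns, pvBVal_cons, hskip]
        simp only [← hn, List.nil_append, Bool.false_or]
        split_ifs <;> ring
      · rw [if_neg hdig]
        have hruns : pvRuns (s.drop j) j = pvRuns (s.drop (j + 1)) (j + 1) := by
          conv_lhs => rw [hdrop, pvRuns_cons_not s[j] (s.drop (j + 1)) j (by simpa using hdig)]
        rw [ih (j + 1) (by omega), hruns]
    · have hnil : s.drop j = ([] : List Char) := List.drop_eq_nil_of_le (by omega)
      rw [dif_neg hj, hnil, pvRuns_nil]
      simp [pvBVal]

theorem pvRowA_eq (s : List Char) (i : Int) (adj : List (List Int)) (j : Nat) (sum : Int) :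
    pvRowA s i adj j sum = sum + pvBVal i adj (pvRuns (s.drop j) j) :=
  pvRowAGo_eq s i adj (s.length + 1 - j) j (by omega) sum

theorem pvFoldl_eq_sum_map (g : Int → Int) (step : Int → Int → Int)
    (hstep : ∀ acc x, step acc x = acc + g x) :
    ∀ (l : List Int) (init : Int), l.foldl step init = init + (l.map g).sum := by
  intro l
  induction l with
  | nil => simp
  | cons x l ih => intro init; simp [List.foldl_cons, hstep, ih, add_assoc]

-- ===== VERDICT (by name: the statement is the Claim_ definition above) =====
theorem sum_adj_nums_spec : Claim_equal_sum_adj_nums := by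
  intro lines sp_i adj_nums _hdom _hpre
  unfold Spec_sum_adj_nums sum_adj_nums sum_adj_nums_alt
  rw [pvFoldl_eq_sum_map
      (fun i => match PySem.List.pyGet? lines i with
        | none => 0
        | some line => pvRowB i adj_nums line.toList)]
  · simp
  · intro acc x
    rcases h : PySem.List.pyGet? lines x with _ | line
    · simp
    · simp only []
      rw [pvRowA_eq, pvRowB_eq_bval]
      simp
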